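-- pv_equiv track=rewrite | github.com/LeilaMoussa/problem-solving | student_heights.py | increasingRowCount2
-- ===== SOURCE A (Python) =====
-- def increasingRowCount2(a: list) -> int:
--     if len(a) == 0:
--         return 0
--
--     row_shortest = [-1, a[0]] # element i is the shortest height in row i, and the rows start at 1
--     max_shortest = a[0]
--     max_shortest_row = 1
--     rows = 1
--     a = a[1:]
--
--     for i, height in enumerate(a):
--         if max_shortest < height:
--             rows += 1
--             row_shortest.append(height)
--             max_shortest = height
--             max_shortest_row = rows
--         else:
--             # new guy joins an existing row
--             # but which row? could be anything we want as long as the shortest in that row is taller than the new guy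
--             # since max_shortest > height, the new guy can join row number max_shortest_row
--             # he becomes the shortest person in that row
--             row_shortest[max_shortest_row] = height
--             # but since max_shortest is no longer the shortest in his row, we need the new max shortest
--             max_shortest = max(row_shortest)
--     return rows
-- ===== SOURCE B (Python) =====
-- def increasingRowCount2(a: list) -> int:
--     # One pass, O(1) state: only the newest row's shortest can still change;
--     # all older rows (and the -1 sentinel slot) are frozen, so their max is a scalar.
--     if not a:
--         return 0
--     rows = 1
--     frozen = -1          # max of the sentinel and every row except the newest
--     last = a[0]          # shortest height of the newest row
--     ms = a[0]            # current max-of-row-shortest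
--     for h in a[1:]:
--         if ms < h:
--             rows += 1
--             frozen = max(frozen, last)
--             last = h
--             ms = h
--         else:
--             last = h
--             ms = max(frozen, h)
--     return rows
-- ===== Notes on version B (the rewrite author's own statement) =====
-- stated objective: faster
-- what changed: B replaces A's growing row_shortest list and per-step max() rescans with O(1) scalar state (max of frozen rows, newest row's shortest, current max), exploiting that only the newest row's slot is ever rewritten.
import Mathlib
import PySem

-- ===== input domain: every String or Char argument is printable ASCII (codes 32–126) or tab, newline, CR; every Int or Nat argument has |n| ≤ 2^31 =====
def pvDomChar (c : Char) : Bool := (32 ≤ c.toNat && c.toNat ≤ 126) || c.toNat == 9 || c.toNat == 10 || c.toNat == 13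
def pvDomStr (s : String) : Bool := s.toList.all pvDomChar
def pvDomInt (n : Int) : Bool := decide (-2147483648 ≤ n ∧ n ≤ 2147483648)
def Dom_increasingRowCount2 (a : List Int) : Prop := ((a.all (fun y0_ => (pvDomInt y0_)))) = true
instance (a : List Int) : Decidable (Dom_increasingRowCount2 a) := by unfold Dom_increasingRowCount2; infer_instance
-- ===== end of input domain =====

-- B replaces A's growing row_shortest list and per-step max() rescans by O(1) scalar state; same return value.

-- ===== PORT A =====
-- Python's max() over row_shortest; that list is always nonempty (it starts as [-1, a[0]]),
-- so the [] case is unreachable.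
def pyMaxA (xs : List Int) : Int :=
  match xs with
  | [] => 0
  | x :: t => t.foldl max x

-- the loop 'for i, height in enumerate(a)': i is unused, so we recurse on the list directly;
-- state = (row_shortest, max_shortest, max_shortest_row, rows).
def iRC2Go : List Int → List Int → Int → Int → Int → Int
  | [], _, _, _, rows => rows
  | height :: rest, row_shortest, max_shortest, max_shortest_row, rows =>
    if max_shortest < height then
      -- rows += 1; row_shortest.append(height); max_shortest = height; max_shortest_row = rows
      iRC2Go rest (row_shortest ++ [height]) height (rows + 1) (rows + 1)
    else
      -- row_shortest[max_shortest_row] = height; max_shortest = max(row_shortest)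
      let rs' := PySem.List.pySetD row_shortest max_shortest_row height
      iRC2Go rest rs' (pyMaxA rs') max_shortest_row rows

def increasingRowCount2 (a : List Int) : Int :=
  match a with
  | [] => 0
  | a0 :: rest => iRC2Go rest [-1, a0] a0 1 1

-- ===== PORT B =====
def iRC2AltGo : List Int → Int → Int → Int → Int → Int
  | [], _, _, _, rows => rows
  | h :: t, frozen, last, ms, rows =>
    if ms < h then
      iRC2AltGo t (max frozen last) h h (rows + 1)
    else
      iRC2AltGo t frozen h (max frozen h) rows

def increasingRowCount2_alt (a : List Int) : Int :=
  match a with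
  | [] => 0
  | a0 :: rest => iRC2AltGo rest (-1) a0 a0 1

-- ===== PRECONDITION & SPEC =====
def Spec_increasingRowCount2 (a : List Int) (out : Int) : Prop := out = increasingRowCount2_alt a
instance (a : List Int) (out : Int) : Decidable (Spec_increasingRowCount2 a out) := by unfold Spec_increasingRowCount2; infer_instance

-- ===== CLAIM (what is proved, stated in full; the proofs are below) =====
def Claim_equal_increasingRowCount2 : Prop := ∀ (a : List Int), Dom_increasingRowCount2 a → Spec_increasingRowCount2 a (increasingRowCount2 a)

-- ===== LEMMAS AND PROOFS =====
theorem pyMaxA_append (xs : List Int) (y : Int) (h : xs ≠ []) :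
    pyMaxA (xs ++ [y]) = max (pyMaxA xs) y := by
  match xs with
  | [] => exact absurd rfl h
  | x :: t => simp [pyMaxA, List.foldl_append]

theorem set_snoc (init : List Int) (last h : Int) :
    (init ++ [last]).set init.length h = init ++ [h] := by
  induction init with
  | nil => rfl
  | cons x t ih => simp [ih]

-- Invariant: row_shortest = init ++ [last] where 'last' is the newest row's slot (the only one
-- ever rewritten), max_shortest_row = rows = init.length, and frozen = pyMaxA init.
theorem go_eq (hs : List Int) : ∀ (init : List Int) (last ms rows : Int),
    init ≠ [] → rows = (init.length : Int) →
    iRC2Go hs (init ++ [last]) ms rows rows = iRC2AltGo hs (pyMaxA init) last ms rows := by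
  induction hs with
  | nil => intro init last ms rows _ _; rfl
  | cons h t ih =>
    intro init last ms rows hne hrows
    by_cases hlt : ms < h
    · simp only [iRC2Go, iRC2AltGo, if_pos hlt]
      have h1 : rows + 1 = ((init ++ [last]).length : Int) := by
        simp [hrows]
      have := ih (init ++ [last]) h h (rows + 1) (by simp) h1
      rw [h1] at this ⊢
      rw [this, pyMaxA_append init last hne]
    · simp only [iRC2Go, iRC2AltGo, if_neg hlt]
      have hset : PySem.List.pySetD (init ++ [last]) rows h = init ++ [h] := by
        rw [hrows, PySem.List.pySetD_natCast, set_snoc]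
      rw [hset, pyMaxA_append init h hne]
      exact ih init h (max (pyMaxA init) h) rows hne hrows

-- ===== VERDICT (by name: the statement is the Claim_ definition above) =====
theorem increasingRowCount2_spec : Claim_equal_increasingRowCount2 := by
  intro a _
  unfold Spec_increasingRowCount2
  match a with
  | [] => rfl
  | a0 :: rest =>
    show iRC2Go rest ([-1] ++ [a0]) a0 1 1 = iRC2AltGo rest (-1) a0 a0 1
    exact go_eq rest [-1] a0 a0 1 (by simp) (by simp)
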